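-- pv_equiv track=rewrite | github.com/kobeomseok95/codingTest | boj/gold/14500.py | get_ilja_scores
-- ===== SOURCE A (Python) =====
-- def get_ilja_scores(n, m, scores):
--     answer = 0
--     for i in range(n):
--         for j in range(m - 3):
--             answer = max(answer, scores[i][j] + scores[i][j + 1] + scores[i][j + 2] + scores[i][j + 3])
--
--     for i in range(n - 3):
--         for j in range(m):
--             answer = max(answer, scores[i][j] + scores[i + 1][j] + scores[i + 2][j] + scores[i + 3][j])
--
--     return answer
-- ===== SOURCE B (Python) =====
-- def get_ilja_scores(n, m, scores):
--     best = 0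
--     if m >= 4:
--         # horizontal strips via per-row prefix sums
--         for i in range(n):
--             row = scores[i]
--             pref = [0]
--             s = 0
--             for k in range(m):
--                 s += row[k]
--                 pref.append(s)
--             for j in range(m - 3):
--                 best = max(best, pref[j + 4] - pref[j])
--     if n >= 4:
--         # vertical strips via column prefix sums (row-by-row accumulation)
--         col = [0] * m
--         prefs = [col]
--         for i in range(n):
--             col = [col[j] + scores[i][j] for j in range(m)]
--             prefs.append(col)
--         for i in range(n - 3):
--             for j in range(m):
--                 best = max(best, prefs[i + 4][j] - prefs[i][j])
--     return best
-- ===== Notes on version B (the rewrite author's own statement) =====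
-- stated objective: alternative
-- what changed: B precomputes per-row prefix sums and a row-accumulated column prefix-sum table, so every 4-cell strip sum becomes one prefix difference instead of A's four-term addition at each position.
import Mathlib
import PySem

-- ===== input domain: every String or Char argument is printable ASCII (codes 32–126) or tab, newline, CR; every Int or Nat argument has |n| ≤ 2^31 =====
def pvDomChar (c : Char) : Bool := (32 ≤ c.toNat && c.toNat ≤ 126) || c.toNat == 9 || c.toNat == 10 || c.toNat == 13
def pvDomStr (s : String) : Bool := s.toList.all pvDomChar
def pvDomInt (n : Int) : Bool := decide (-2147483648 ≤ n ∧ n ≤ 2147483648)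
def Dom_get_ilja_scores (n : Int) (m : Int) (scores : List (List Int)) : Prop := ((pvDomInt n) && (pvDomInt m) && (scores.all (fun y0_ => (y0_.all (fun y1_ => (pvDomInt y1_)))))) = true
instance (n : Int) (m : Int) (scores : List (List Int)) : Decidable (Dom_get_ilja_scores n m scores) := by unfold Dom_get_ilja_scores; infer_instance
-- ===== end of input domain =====

-- B replaces A's four-term window additions by prefix-sum differences (per-row prefix
-- sums for horizontal strips, a row-accumulated column prefix-sum table for vertical
-- ones); objective: alternative decomposition, same asymptotic cost.


-- ===== PORT A =====
-- scores[i][j] is ported as pyGetD …; under Pre_ every access Python performs is in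
-- range, so the defaults are never used.
def get_ilja_scores (n : Int) (m : Int) (scores : List (List Int)) : Int :=
  let hor :=
    (PySem.List.pyRange 0 n 1).foldl (fun ans i =>
      (PySem.List.pyRange 0 (m - 3) 1).foldl (fun ans j =>
        max ans (PySem.List.pyGetD (PySem.List.pyGetD scores i []) j 0 +
                 PySem.List.pyGetD (PySem.List.pyGetD scores i []) (j + 1) 0 +
                 PySem.List.pyGetD (PySem.List.pyGetD scores i []) (j + 2) 0 +
                 PySem.List.pyGetD (PySem.List.pyGetD scores i []) (j + 3) 0)) ans) 0
  (PySem.List.pyRange 0 (n - 3) 1).foldl (fun ans i =>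
    (PySem.List.pyRange 0 m 1).foldl (fun ans j =>
      max ans (PySem.List.pyGetD (PySem.List.pyGetD scores i []) j 0 +
               PySem.List.pyGetD (PySem.List.pyGetD scores (i + 1) []) j 0 +
               PySem.List.pyGetD (PySem.List.pyGetD scores (i + 2) []) j 0 +
               PySem.List.pyGetD (PySem.List.pyGetD scores (i + 3) []) j 0)) ans) hor

-- ===== PORT B =====
def get_ilja_scores_alt (n : Int) (m : Int) (scores : List (List Int)) : Int :=
  let best : Int := 0
  let best :=
    if 4 ≤ m then
      (PySem.List.pyRange 0 n 1).foldl (fun best i =>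
        let row := PySem.List.pyGetD scores i []
        let pref := ((PySem.List.pyRange 0 m 1).foldl
          (fun (ps : List Int × Int) k =>
            let s := ps.2 + PySem.List.pyGetD row k 0
            (ps.1 ++ [s], s)) ([0], 0)).1
        (PySem.List.pyRange 0 (m - 3) 1).foldl (fun best j =>
          max best (PySem.List.pyGetD pref (j + 4) 0 - PySem.List.pyGetD pref j 0)) best) best
    else best
  if 4 ≤ n then
    let z : List Int := List.replicate m.toNat 0   -- [0] * m
    let prefs := ((PySem.List.pyRange 0 n 1).foldl
      (fun (cp : List Int × List (List Int)) i =>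
        let col := (PySem.List.pyRange 0 m 1).map (fun j =>
          PySem.List.pyGetD cp.1 j 0 +
          PySem.List.pyGetD (PySem.List.pyGetD scores i []) j 0)
        (col, cp.2 ++ [col])) (z, [z])).2
    (PySem.List.pyRange 0 (n - 3) 1).foldl (fun best i =>
      (PySem.List.pyRange 0 m 1).foldl (fun best j =>
        max best (PySem.List.pyGetD (PySem.List.pyGetD prefs (i + 4) []) j 0 -
                  PySem.List.pyGetD (PySem.List.pyGetD prefs i []) j 0)) best) best
  else best

-- ===== PRECONDITION & SPEC =====
-- Exactly the inputs on which Python A returns (no IndexError): whenever some 4-cell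
-- strip position exists, the first n rows must exist and each have at least m entries.
def Pre_get_ilja_scores (n : Int) (m : Int) (scores : List (List Int)) : Prop :=
  (!((decide (1 ≤ n) && decide (4 ≤ m)) || (decide (4 ≤ n) && decide (1 ≤ m))) ||
   (decide (n ≤ (scores.length : Int)) &&
    (scores.take n.toNat).all (fun row => decide (m ≤ (row.length : Int))))) = true
instance (n : Int) (m : Int) (scores : List (List Int)) : Decidable (Pre_get_ilja_scores n m scores) := by unfold Pre_get_ilja_scores; infer_instance
def pvWitness_get_ilja_scores : Int × Int × List (List Int) :=
  (4, 4, [[1, 2, 3, 4], [5, 6, 7, 8], [9, 1, 2, 3], [4, 5, 6, 7]])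

def Spec_get_ilja_scores (n : Int) (m : Int) (scores : List (List Int)) (out : Int) : Prop := out = get_ilja_scores_alt n m scores
instance (n : Int) (m : Int) (scores : List (List Int)) (out : Int) : Decidable (Spec_get_ilja_scores n m scores out) := by unfold Spec_get_ilja_scores; infer_instance

-- ===== CLAIM (what is proved, stated in full; the proofs are below) =====
def Claim_equal_get_ilja_scores : Prop := ∀ (n : Int) (m : Int) (scores : List (List Int)), Dom_get_ilja_scores n m scores → Pre_get_ilja_scores n m scores → Spec_get_ilja_scores n m scores (get_ilja_scores n m scores)

-- ===== LEMMAS AND PROOFS =====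

-- partial sums of a row (pvS row t = row[0] + … + row[t-1]) and of a column
def pvS (row : List Int) (t : Nat) : Int := (row.take t).sum
def pvCS (scores : List (List Int)) (j t : Nat) : Int := ((scores.take t).map (fun r => r.getD j 0)).sum
def pvC (scores : List (List Int)) (mN t : Nat) : List Int := (List.range mN).map (fun j => pvCS scores j t)

theorem foldl_id {α β : Type} (l : List β) (init : α) :
    l.foldl (fun a _ => a) init = init := by
  induction l generalizing init with
  | nil => rfl
  | cons x xs ih => simp only [List.foldl_cons]; exact ih init

theorem pvS_succ (row : List Int) (t : Nat) (h : t < row.length) :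
    pvS row (t+1) = pvS row t + row.getD t 0 := by
  have ht : row.take (t+1) = row.take t ++ [row[t]] := by
    rw [List.take_add_one, List.getElem?_eq_getElem h]; rfl
  unfold pvS
  rw [ht, List.sum_append, List.getD_eq_getElem?_getD, List.getElem?_eq_getElem h]
  simp

theorem pvS_window (row : List Int) (j : Nat) (h : j + 4 ≤ row.length) :
    pvS row (j+4) - pvS row j =
      row.getD j 0 + row.getD (j+1) 0 + row.getD (j+2) 0 + row.getD (j+3) 0 := by
  have h1 := pvS_succ row j (by omega)
  have h2 := pvS_succ row (j+1) (by omega)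
  have h3 := pvS_succ row (j+2) (by omega)
  have h4 := pvS_succ row (j+3) (by omega)
  have e2 : j+1+1 = j+2 := by omega
  have e3 : j+2+1 = j+3 := by omega
  have e4 : j+3+1 = j+4 := by omega
  rw [e2] at h2; rw [e3] at h3; rw [e4] at h4
  omega

theorem pvCS_succ (scores : List (List Int)) (j t : Nat) (h : t < scores.length) :
    pvCS scores j (t+1) = pvCS scores j t + (scores.getD t []).getD j 0 := by
  have ht : scores.take (t+1) = scores.take t ++ [scores[t]] := by
    rw [List.take_add_one, List.getElem?_eq_getElem h]; rfl
  have hd : scores.getD t [] = scores[t] := by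
    rw [List.getD_eq_getElem?_getD, List.getElem?_eq_getElem h]; rfl
  unfold pvCS
  rw [ht, List.map_append, List.sum_append, hd]
  simp

theorem pvCS_window (scores : List (List Int)) (j i : Nat) (h : i + 4 ≤ scores.length) :
    pvCS scores j (i+4) - pvCS scores j i =
      (scores.getD i []).getD j 0 + (scores.getD (i+1) []).getD j 0 +
      (scores.getD (i+2) []).getD j 0 + (scores.getD (i+3) []).getD j 0 := by
  have h1 := pvCS_succ scores j i (by omega)
  have h2 := pvCS_succ scores j (i+1) (by omega)
  have h3 := pvCS_succ scores j (i+2) (by omega)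
  have h4 := pvCS_succ scores j (i+3) (by omega)
  have e2 : i+1+1 = i+2 := by omega
  have e3 : i+2+1 = i+3 := by omega
  have e4 : i+3+1 = i+4 := by omega
  rw [e2] at h2; rw [e3] at h3; rw [e4] at h4
  omega

theorem pvPrefFold (row : List Int) (mN : Nat) (h : mN ≤ row.length) :
    ((PySem.List.pyRange 0 (mN : Int) 1).foldl
      (fun (ps : List Int × Int) k =>
        (ps.1 ++ [ps.2 + PySem.List.pyGetD row k 0], ps.2 + PySem.List.pyGetD row k 0))
      ([0], 0))
    = ((List.range (mN + 1)).map (fun t => pvS row t), pvS row mN) := by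
  induction mN with
  | zero => simp [PySem.List.pyRange_one_eq_nil (by omega : (0:Int) ≤ 0), pvS]
  | succ k ih =>
    have hk : k ≤ row.length := by omega
    rw [show ((k+1 : Nat) : Int) = (k:Int)+1 by push_cast; ring,
        PySem.List.pyRange_one_succ_right (by positivity), List.foldl_append, ih hk]
    simp [List.range_succ]
    rw [pvS_succ row k (by omega), List.getD_eq_getElem?_getD]

theorem pvColFold (scores : List (List Int)) (mN tN : Nat) (ht : tN ≤ scores.length) :
    ((PySem.List.pyRange 0 (tN : Int) 1).foldl
      (fun (cp : List Int × List (List Int)) i =>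
        ((PySem.List.pyRange 0 (mN:Int) 1).map (fun j =>
            PySem.List.pyGetD cp.1 j 0 + PySem.List.pyGetD (PySem.List.pyGetD scores i []) j 0),
         cp.2 ++ [(PySem.List.pyRange 0 (mN:Int) 1).map (fun j =>
            PySem.List.pyGetD cp.1 j 0 + PySem.List.pyGetD (PySem.List.pyGetD scores i []) j 0)]))
      (List.replicate mN 0, [List.replicate mN 0]))
    = (pvC scores mN tN, (List.range (tN+1)).map (pvC scores mN)) := by
  have hC0 : pvC scores mN 0 = List.replicate mN 0 := by
    simp [pvC, pvCS]
  induction tN with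
  | zero =>
    simp [PySem.List.pyRange_one_eq_nil (le_refl (0:Int)), hC0]
  | succ k ih =>
    have hk : k ≤ scores.length := by omega
    have hstep : (PySem.List.pyRange 0 (mN:Int) 1).map (fun j =>
        PySem.List.pyGetD (pvC scores mN k) j 0 +
        PySem.List.pyGetD (PySem.List.pyGetD scores (k:Int) []) j 0)
        = pvC scores mN (k+1) := by
      rw [PySem.List.pyRange_zero_nat]
      unfold pvC
      rw [List.map_map]
      apply List.map_congr_left
      intro x hx
      have hxm : x < mN := List.mem_range.mp hx
      simp only [Function.comp]
      rw [PySem.List.pyGetD_natCast, PySem.List.pyGetD_natCast, PySem.List.pyGetD_natCast]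
      have hmap : (List.map (fun j => pvCS scores j k) (List.range mN)).getD x 0 = pvCS scores x k := by
        rw [List.getD_eq_getElem?_getD]
        simp [hxm]
      rw [hmap, pvCS_succ scores x k (by omega)]
    rw [show ((k+1:Nat):Int) = (k:Int)+1 by push_cast; ring,
        PySem.List.pyRange_one_succ_right (by exact_mod_cast Nat.zero_le k),
        List.foldl_append, ih hk, List.foldl_cons, List.foldl_nil]
    rw [hstep]
    simp [List.range_succ]

theorem pvHorPt (mN : Nat) (row : List Int) (hrow : mN ≤ row.length) (b j : Int)
    (hj : j ∈ PySem.List.pyRange 0 ((mN:Int) - 3) 1) :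
    max b (PySem.List.pyGetD row j 0 + PySem.List.pyGetD row (j+1) 0 +
           PySem.List.pyGetD row (j+2) 0 + PySem.List.pyGetD row (j+3) 0)
    = max b (PySem.List.pyGetD ((List.range (mN+1)).map (fun t => pvS row t)) (j+4) 0 -
             PySem.List.pyGetD ((List.range (mN+1)).map (fun t => pvS row t)) j 0) := by
  obtain ⟨hj0, hjlt⟩ := PySem.List.mem_pyRange_one.mp hj
  have hjn : j = ((j.toNat : Nat) : Int) := (Int.toNat_of_nonneg hj0).symm
  congr 1
  rw [hjn,
      show ((j.toNat:Int)+1) = ((j.toNat+1:Nat):Int) by push_cast; ring,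
      show ((j.toNat:Int)+2) = ((j.toNat+2:Nat):Int) by push_cast; ring,
      show ((j.toNat:Int)+3) = ((j.toNat+3:Nat):Int) by push_cast; ring,
      show ((j.toNat:Int)+4) = ((j.toNat+4:Nat):Int) by push_cast; ring]
  simp only [PySem.List.pyGetD_natCast]
  have hget : ∀ t : Nat, t < mN + 1 →
      (List.map (fun t => pvS row t) (List.range (mN+1))).getD t 0 = pvS row t := by
    intro t htm
    rw [List.getD_eq_getElem?_getD]
    simp [htm]
  rw [hget (j.toNat+4) (by omega), hget j.toNat (by omega),
      pvS_window row j.toNat (by omega)]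

theorem pvVertPt (nN mN : Nat) (scores : List (List Int)) (hlen : nN ≤ scores.length)
    (b i j : Int)
    (hi : i ∈ PySem.List.pyRange 0 ((nN:Int) - 3) 1)
    (hj : j ∈ PySem.List.pyRange 0 (mN:Int) 1) :
    max b (PySem.List.pyGetD (PySem.List.pyGetD scores i []) j 0 +
           PySem.List.pyGetD (PySem.List.pyGetD scores (i+1) []) j 0 +
           PySem.List.pyGetD (PySem.List.pyGetD scores (i+2) []) j 0 +
           PySem.List.pyGetD (PySem.List.pyGetD scores (i+3) []) j 0)
    = max b (PySem.List.pyGetD (PySem.List.pyGetD ((List.range (nN+1)).map (pvC scores mN)) (i+4) []) j 0 -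
             PySem.List.pyGetD (PySem.List.pyGetD ((List.range (nN+1)).map (pvC scores mN)) i []) j 0) := by
  obtain ⟨hi0, hilt⟩ := PySem.List.mem_pyRange_one.mp hi
  obtain ⟨hj0, hjlt⟩ := PySem.List.mem_pyRange_one.mp hj
  have hin : i = ((i.toNat : Nat) : Int) := (Int.toNat_of_nonneg hi0).symm
  have hjn : j = ((j.toNat : Nat) : Int) := (Int.toNat_of_nonneg hj0).symm
  congr 1
  rw [hin, hjn,
      show ((i.toNat:Int)+1) = ((i.toNat+1:Nat):Int) by push_cast; ring,
      show ((i.toNat:Int)+2) = ((i.toNat+2:Nat):Int) by push_cast; ring,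
      show ((i.toNat:Int)+3) = ((i.toNat+3:Nat):Int) by push_cast; ring,
      show ((i.toNat:Int)+4) = ((i.toNat+4:Nat):Int) by push_cast; ring]
  simp only [PySem.List.pyGetD_natCast]
  have hgetP : ∀ t : Nat, t < nN + 1 →
      (List.map (pvC scores mN) (List.range (nN+1))).getD t [] = pvC scores mN t := by
    intro t htm
    rw [List.getD_eq_getElem?_getD]
    simp [htm]
  have hgetC : ∀ t : Nat, (pvC scores mN t).getD j.toNat 0 = pvCS scores j.toNat t := by
    intro t
    unfold pvC
    rw [List.getD_eq_getElem?_getD]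
    simp [show j.toNat < mN by omega]
  rw [hgetP (i.toNat+4) (by omega), hgetP i.toNat (by omega), hgetC, hgetC,
      pvCS_window scores j.toNat i.toNat (by omega)]

theorem pvHorFoldEq (n m : Int) (scores : List (List Int))
    (hpre : ((1 ≤ n ∧ 4 ≤ m) ∨ (4 ≤ n ∧ 1 ≤ m)) →
      (n ≤ (scores.length : Int) ∧ ∀ row ∈ scores.take n.toNat, m ≤ (row.length : Int)))
    (hm : 4 ≤ m) :
    List.foldl (fun ans i =>
      List.foldl (fun ans j =>
        max ans (PySem.List.pyGetD (PySem.List.pyGetD scores i []) j 0 +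
                 PySem.List.pyGetD (PySem.List.pyGetD scores i []) (j + 1) 0 +
                 PySem.List.pyGetD (PySem.List.pyGetD scores i []) (j + 2) 0 +
                 PySem.List.pyGetD (PySem.List.pyGetD scores i []) (j + 3) 0)) ans
        (PySem.List.pyRange 0 (m - 3) 1)) 0 (PySem.List.pyRange 0 n 1)
    = List.foldl (fun best i =>
        List.foldl (fun best j =>
          max best (PySem.List.pyGetD (((PySem.List.pyRange 0 m 1).foldl
              (fun (ps : List Int × Int) k =>
                (ps.1 ++ [ps.2 + PySem.List.pyGetD (PySem.List.pyGetD scores i []) k 0],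
                 ps.2 + PySem.List.pyGetD (PySem.List.pyGetD scores i []) k 0)) ([0], 0)).1) (j + 4) 0 -
                   PySem.List.pyGetD (((PySem.List.pyRange 0 m 1).foldl
              (fun (ps : List Int × Int) k =>
                (ps.1 ++ [ps.2 + PySem.List.pyGetD (PySem.List.pyGetD scores i []) k 0],
                 ps.2 + PySem.List.pyGetD (PySem.List.pyGetD scores i []) k 0)) ([0], 0)).1) j 0)) best
          (PySem.List.pyRange 0 (m - 3) 1)) 0 (PySem.List.pyRange 0 n 1) := by
  refine PySem.List.foldl_congr_mem _ _ _ _ ?_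
  intro ans i hi
  obtain ⟨hi0, hilt⟩ := PySem.List.mem_pyRange_one.mp hi
  obtain ⟨hlen, hrows⟩ := hpre (Or.inl ⟨by omega, hm⟩)
  have hil : i.toNat < scores.length := by omega
  have hrowm : scores[i.toNat] ∈ scores.take n.toNat := by
    have h1 : i.toNat < n.toNat := by omega
    have h2 : i.toNat < (scores.take n.toNat).length := by
      simp only [List.length_take]; omega
    have h3 : (scores.take n.toNat)[i.toNat]'h2 = scores[i.toNat] := by
      simp
    rw [← h3]
    exact List.getElem_mem h2
  have hrl : m ≤ ((scores[i.toNat] : List Int).length : Int) := hrows _ hrowm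
  have hg : PySem.List.pyGetD scores i [] = scores[i.toNat] :=
    PySem.List.pyGetD_eq_getElem scores [] hi0 (by omega)
  rw [hg]
  have hmc : m = ((m.toNat : Nat) : Int) := (Int.toNat_of_nonneg (by omega)).symm
  rw [hmc]
  have hp := pvPrefFold (scores[i.toNat]) m.toNat (by omega)
  rw [hp]
  refine PySem.List.foldl_congr_mem _ _ _ _ ?_
  intro b j hj
  exact pvHorPt m.toNat (scores[i.toNat]) (by omega) b j hj

theorem pvHorZero (n m : Int) (scores : List (List Int)) (hm' : m - 3 ≤ 0) :
    List.foldl (fun ans i =>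
      List.foldl (fun ans j =>
        max ans (PySem.List.pyGetD (PySem.List.pyGetD scores i []) j 0 +
                 PySem.List.pyGetD (PySem.List.pyGetD scores i []) (j + 1) 0 +
                 PySem.List.pyGetD (PySem.List.pyGetD scores i []) (j + 2) 0 +
                 PySem.List.pyGetD (PySem.List.pyGetD scores i []) (j + 3) 0)) ans
        (PySem.List.pyRange 0 (m - 3) 1)) 0 (PySem.List.pyRange 0 n 1) = 0 := by
  rw [PySem.List.pyRange_one_eq_nil hm']
  simp only [List.foldl_nil]
  exact foldl_id _ _

theorem pvVertFoldEq (n m : Int) (scores : List (List Int))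
    (hpre : ((1 ≤ n ∧ 4 ≤ m) ∨ (4 ≤ n ∧ 1 ≤ m)) →
      (n ≤ (scores.length : Int) ∧ ∀ row ∈ scores.take n.toNat, m ≤ (row.length : Int)))
    (hn : 4 ≤ n) (init : Int) :
    List.foldl (fun ans i =>
      List.foldl (fun ans j =>
        max ans (PySem.List.pyGetD (PySem.List.pyGetD scores i []) j 0 +
                 PySem.List.pyGetD (PySem.List.pyGetD scores (i + 1) []) j 0 +
                 PySem.List.pyGetD (PySem.List.pyGetD scores (i + 2) []) j 0 +
                 PySem.List.pyGetD (PySem.List.pyGetD scores (i + 3) []) j 0)) ans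
        (PySem.List.pyRange 0 m 1)) init (PySem.List.pyRange 0 (n - 3) 1)
    = List.foldl (fun best i =>
        List.foldl (fun best j =>
          max best (PySem.List.pyGetD (PySem.List.pyGetD (((PySem.List.pyRange 0 n 1).foldl
              (fun (cp : List Int × List (List Int)) i =>
                ((PySem.List.pyRange 0 m 1).map (fun j =>
                    PySem.List.pyGetD cp.1 j 0 + PySem.List.pyGetD (PySem.List.pyGetD scores i []) j 0),
                 cp.2 ++ [(PySem.List.pyRange 0 m 1).map (fun j =>
                    PySem.List.pyGetD cp.1 j 0 + PySem.List.pyGetD (PySem.List.pyGetD scores i []) j 0)]))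
              (List.replicate m.toNat 0, [List.replicate m.toNat 0])).2) (i + 4) []) j 0 -
                   PySem.List.pyGetD (PySem.List.pyGetD (((PySem.List.pyRange 0 n 1).foldl
              (fun (cp : List Int × List (List Int)) i =>
                ((PySem.List.pyRange 0 m 1).map (fun j =>
                    PySem.List.pyGetD cp.1 j 0 + PySem.List.pyGetD (PySem.List.pyGetD scores i []) j 0),
                 cp.2 ++ [(PySem.List.pyRange 0 m 1).map (fun j =>
                    PySem.List.pyGetD cp.1 j 0 + PySem.List.pyGetD (PySem.List.pyGetD scores i []) j 0)]))
              (List.replicate m.toNat 0, [List.replicate m.toNat 0])).2) i []) j 0)) best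
          (PySem.List.pyRange 0 m 1)) init (PySem.List.pyRange 0 (n - 3) 1) := by
  by_cases hm1 : 1 ≤ m
  · obtain ⟨hlen, _⟩ := hpre (Or.inr ⟨hn, hm1⟩)
    have hnc : n = ((n.toNat : Nat) : Int) := (Int.toNat_of_nonneg (by omega)).symm
    have hmc : m = ((m.toNat : Nat) : Int) := (Int.toNat_of_nonneg (by omega)).symm
    rw [hnc, hmc]
    simp only [Int.toNat_natCast]
    have hcf := pvColFold scores m.toNat n.toNat (by omega)
    rw [hcf]
    refine PySem.List.foldl_congr_mem _ _ _ _ ?_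
    intro a i hi
    refine PySem.List.foldl_congr_mem _ _ _ _ ?_
    intro b j hj
    exact pvVertPt n.toNat m.toNat scores (by omega) b i j hi hj
  · rw [PySem.List.pyRange_one_eq_nil (show m ≤ 0 by omega)]
    simp only [List.foldl_nil, foldl_id]

-- ===== VERDICT (by name: the statement is the Claim_ definition above) =====
theorem get_ilja_scores_spec : Claim_equal_get_ilja_scores := by
  intro n m scores _hdom hpreB
  have hpre : ((1 ≤ n ∧ 4 ≤ m) ∨ (4 ≤ n ∧ 1 ≤ m)) →
      (n ≤ (scores.length : Int) ∧ ∀ row ∈ scores.take n.toNat, m ≤ (row.length : Int)) := by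
    intro hant
    unfold Pre_get_ilja_scores at hpreB
    simp only [Bool.or_eq_true, Bool.and_eq_true, Bool.not_eq_true', Bool.or_eq_false_iff,
      Bool.and_eq_false_iff, decide_eq_true_eq, decide_eq_false_iff_not,
      List.all_eq_true] at hpreB
    rcases hpreB with h | h
    · exfalso
      rcases hant with ⟨ha, hb⟩ | ⟨ha, hb⟩ <;> rcases h with ⟨h1, h2⟩ <;>
        rcases h1 with h1 | h1 <;> rcases h2 with h2 | h2 <;> omega
    · exact ⟨h.1, h.2⟩
  unfold Spec_get_ilja_scores
  simp only [get_ilja_scores, get_ilja_scores_alt]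
  by_cases hm : 4 ≤ m
  · by_cases hn : 4 ≤ n
    · rw [if_pos hm, if_pos hn]
      rw [pvHorFoldEq n m scores hpre hm]
      exact pvVertFoldEq n m scores hpre hn _
    · rw [if_pos hm, if_neg hn, PySem.List.pyRange_one_eq_nil (show n - 3 ≤ 0 by omega)]
      simp only [List.foldl_nil]
      exact pvHorFoldEq n m scores hpre hm
  · by_cases hn : 4 ≤ n
    · rw [if_neg hm, if_pos hn]
      rw [pvHorZero n m scores (by omega)]
      exact pvVertFoldEq n m scores hpre hn 0
    · rw [if_neg hm, if_neg hn, PySem.List.pyRange_one_eq_nil (show n - 3 ≤ 0 by omega)]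
      simp only [List.foldl_nil]
      exact pvHorZero n m scores (by omega)
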